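-- pv_equiv track=rewrite | github.com/mfep/advent-of-code | 2019/10/day10.py | count_blocked
-- ===== SOURCE A (Python) =====
-- import math
-- from collections import defaultdict
--
-- def count_blocked(cx, cy, data):
--     blocked_directions = defaultdict(lambda: [])
--     sorted_data = sorted(data, key=lambda xy: abs(cx - xy[0]) + abs(cy - xy[1]))
--     for x,y in sorted_data:
--         diff = (x - cx, y - cy)
--         gcd = math.gcd(diff[0], diff[1])
--         if gcd == 0: continue
--         diff_div = (int(diff[0] / gcd), int(diff[1] / gcd))
--         blocked_directions[diff_div].append((x, y))
--     return blocked_directions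
-- ===== SOURCE B (Python) =====
-- import math
--
-- def count_blocked(cx, cy, data):
--     def direction(p):
--         g = math.gcd(p[0] - cx, p[1] - cy)
--         return ((p[0] - cx) // g, (p[1] - cy) // g)
--
--     pts = [p for p in sorted(data, key=lambda xy: abs(cx - xy[0]) + abs(cy - xy[1]))
--            if p != (cx, cy)]
--     res = {}
--     while pts:
--         k = direction(pts[0])
--         res[k] = [p for p in pts if direction(p) == k]
--         pts = [p for p in pts if direction(p) != k]
--     return res
-- ===== Notes on version B (the rewrite author's own statement) =====
-- stated objective: alternative
-- what changed: A makes one pass over the distance-sorted points, appending each into a defaultdict bucket keyed by its reduced direction; B instead repeatedly takes the nearest still-unassigned point, extracts its entire line-of-sight bucket by partitioning the remaining list on that direction, and returns a plain dict (equal to A's defaultdict as a mapping).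
import Mathlib
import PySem

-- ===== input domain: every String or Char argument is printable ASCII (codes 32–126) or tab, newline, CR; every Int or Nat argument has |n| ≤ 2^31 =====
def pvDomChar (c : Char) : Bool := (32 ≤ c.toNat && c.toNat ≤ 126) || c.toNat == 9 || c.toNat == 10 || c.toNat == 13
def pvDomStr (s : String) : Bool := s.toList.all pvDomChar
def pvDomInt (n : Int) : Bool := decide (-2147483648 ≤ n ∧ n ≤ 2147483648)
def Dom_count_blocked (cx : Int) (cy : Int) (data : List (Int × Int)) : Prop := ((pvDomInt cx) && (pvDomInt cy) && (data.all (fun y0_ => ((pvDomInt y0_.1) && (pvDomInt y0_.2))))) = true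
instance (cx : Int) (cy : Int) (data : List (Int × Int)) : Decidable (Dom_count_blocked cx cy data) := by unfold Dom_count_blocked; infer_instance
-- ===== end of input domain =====

-- B replaces A's single-pass defaultdict accumulation by repeatedly extracting the whole
-- line-of-sight bucket of the nearest unassigned asteroid (alternative decomposition, not faster).
-- B returns a plain dict equal to A's defaultdict as a mapping.

-- ===== PORT A =====
-- int(diff/gcd) is exact truncating division here (gcd divides diff; floats are exact for these magnitudes), ported as Int.tdiv.
def count_blocked (cx : Int) (cy : Int) (data : List (Int × Int)) : List (Int × Int × List (Int × Int)) :=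
  let sorted_data := PySem.List.sorted data (fun xy => |cx - xy.1| + |cy - xy.2|) false
  let blocked_directions :=
    sorted_data.foldl (fun d xy =>
      let diff := (xy.1 - cx, xy.2 - cy)
      let g : Int := (Int.gcd diff.1 diff.2 : Int)
      if g == 0 then d
      else d.modify (diff.1.tdiv g, diff.2.tdiv g) [] (· ++ [(xy.1, xy.2)]))
      (PySem.Dict.empty : PySem.Dict (Int × Int) (List (Int × Int)))
  blocked_directions.items.map (fun p => (p.1.1, p.1.2, p.2))

-- ===== PORT B =====
-- the local helper 'direction' of Source B ('//' is Python floor division)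
def pvDirB (cx : Int) (cy : Int) (p : Int × Int) : Int × Int :=
  (PySem.Int.floordiv (p.1 - cx) (Int.gcd (p.1 - cx) (p.2 - cy) : Int),
   PySem.Int.floordiv (p.2 - cy) (Int.gcd (p.1 - cx) (p.2 - cy) : Int))

-- Source B's 'while pts:' loop, state (pts, res); each round extracts the bucket of pts[0]'s direction
def pvExtractLoop (cx : Int) (cy : Int) (pts : List (Int × Int))
    (res : PySem.Dict (Int × Int) (List (Int × Int))) : PySem.Dict (Int × Int) (List (Int × Int)) :=
  match pts with
  | [] => res
  | p :: rest =>
    pvExtractLoop cx cy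
      ((p :: rest).filter (fun q => pvDirB cx cy q != pvDirB cx cy p))
      (res.insert (pvDirB cx cy p) ((p :: rest).filter (fun q => pvDirB cx cy q == pvDirB cx cy p)))
termination_by pts.length
decreasing_by
  have h : (p :: rest).filter (fun q => pvDirB cx cy q != pvDirB cx cy p)
      = rest.filter (fun q => pvDirB cx cy q != pvDirB cx cy p) := by
    simp
  rw [h]
  exact Nat.lt_succ_of_le (List.length_filter_le _ _)

def count_blocked_alt (cx : Int) (cy : Int) (data : List (Int × Int)) : List (Int × Int × List (Int × Int)) :=
  let pts := (PySem.List.sorted data (fun xy => |cx - xy.1| + |cy - xy.2|) false).filter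
      (fun p => p != (cx, cy))
  (pvExtractLoop cx cy pts PySem.Dict.empty).items.map (fun p => (p.1.1, p.1.2, p.2))

-- ===== PRECONDITION & SPEC =====
def Spec_count_blocked (cx : Int) (cy : Int) (data : List (Int × Int)) (out : List (Int × Int × List (Int × Int))) : Prop := out = count_blocked_alt cx cy data
instance (cx : Int) (cy : Int) (data : List (Int × Int)) (out : List (Int × Int × List (Int × Int))) : Decidable (Spec_count_blocked cx cy data out) := by unfold Spec_count_blocked; infer_instance

-- ===== CLAIM (what is proved, stated in full; the proofs are below) =====
def Claim_equal_count_blocked : Prop := ∀ (cx : Int) (cy : Int) (data : List (Int × Int)), Dom_count_blocked cx cy data → Spec_count_blocked cx cy data (count_blocked cx cy data)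

-- ===== LEMMAS AND PROOFS =====

-- A's direction key, named for the proofs
def pvKeyA (cx : Int) (cy : Int) (xy : Int × Int) : Int × Int :=
  ((xy.1 - cx).tdiv (Int.gcd (xy.1 - cx) (xy.2 - cy) : Int),
   (xy.2 - cy).tdiv (Int.gcd (xy.1 - cx) (xy.2 - cy) : Int))

-- A's truncating key and B's flooring key agree (gcd divides; both are 0 on division by 0)
theorem pv_key_eq (cx cy : Int) : pvKeyA cx cy = pvDirB cx cy := by
  funext p
  unfold pvKeyA pvDirB PySem.Int.floordiv
  by_cases h : (Int.gcd (p.1 - cx) (p.2 - cy) : Int) = 0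
  · simp [h]
  · have h1 : (Int.gcd (p.1 - cx) (p.2 - cy) : Int) ∣ (p.1 - cx) := Int.gcd_dvd_left _ _
    have h2 : (Int.gcd (p.1 - cx) (p.2 - cy) : Int) ∣ (p.2 - cy) := Int.gcd_dvd_right _ _
    rw [Int.tdiv_eq_ediv_of_dvd h1, Int.tdiv_eq_ediv_of_dvd h2,
        Int.fdiv_eq_ediv_of_dvd h1, Int.fdiv_eq_ediv_of_dvd h2]

-- set(xs) commutes with filtering, provided the predicate is false on the removed duplicates' value
theorem pv_filter_ofList {α : Type} [BEq α] [LawfulBEq α] (p : α → Bool) (xs : List α) :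
    (PySem.Set.ofList xs).filter p = PySem.Set.ofList (xs.filter p) := by
  induction xs with
  | nil => rfl
  | cons x t ih =>
    rw [PySem.Set.ofList_cons]
    by_cases hp : p x = true
    · rw [List.filter_cons_of_pos hp, List.filter_cons_of_pos hp, PySem.Set.ofList_cons, ← ih]
      unfold PySem.Set.discard
      rw [List.filter_filter, List.filter_filter]
      have hc : (fun a => p a && !(a == x)) = (fun a => !(a == x) && p a) := by
        funext a; exact Bool.and_comm _ _
      rw [hc]
    · rw [List.filter_cons_of_neg hp, List.filter_cons_of_neg hp, ← ih]
      unfold PySem.Set.discard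
      rw [List.filter_filter]
      apply List.filter_congr
      intro a _
      by_cases hax : a = x
      · subst hax; simp [hp]
      · simp [hax]

theorem pv_discard_ofList {α : Type} [BEq α] [LawfulBEq α] (xs : List α) (k : α) :
    (PySem.Set.ofList xs).discard k = PySem.Set.ofList (xs.filter (fun x => x != k)) := by
  unfold PySem.Set.discard
  exact pv_filter_ofList _ xs

-- B's extraction loop, characterised: it appends one entry per distinct direction (first-encounter
-- order), each holding that direction's filter of the ORIGINAL remaining list
theorem pv_loop_items (cx cy : Int) :
    ∀ (n : ℕ) (l : List (Int × Int)), l.length = n →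
    ∀ (res : PySem.Dict (Int × Int) (List (Int × Int))), res.keys.Nodup →
      (∀ q ∈ l, res.contains (pvDirB cx cy q) = false) →
      (pvExtractLoop cx cy l res).items
        = res.items ++ (PySem.Set.ofList (l.map (pvDirB cx cy))).map
            (fun k => (k, l.filter (fun q => pvDirB cx cy q == k))) := by
  intro n
  induction n using Nat.strong_induction_on with
  | _ n ih =>
    intro l hlen res hnd hdisj
    match l with
    | [] => simp [pvExtractLoop]
    | p :: rest =>
      rw [pvExtractLoop]
      have hhead : (p :: rest).filter (fun q => pvDirB cx cy q != pvDirB cx cy p)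
          = rest.filter (fun q => pvDirB cx cy q != pvDirB cx cy p) := by
        simp
      have hcont : res.contains (pvDirB cx cy p) = false := hdisj p (by simp)
      have hlt : ((p :: rest).filter (fun q => pvDirB cx cy q != pvDirB cx cy p)).length < n := by
        rw [hhead, ← hlen]
        exact Nat.lt_succ_of_le (List.length_filter_le _ _)
      rw [ih _ hlt _ rfl _ (PySem.Dict.nodup_keys_insert _ _ _ hnd) ?_]
      · rw [PySem.Dict.items_insert_of_not_contains _ _ hcont]
        rw [List.append_assoc]
        congr 1
        have hset : PySem.Set.ofList ((p :: rest).map (pvDirB cx cy))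
            = pvDirB cx cy p ::
              PySem.Set.ofList (((p :: rest).filter (fun q => pvDirB cx cy q != pvDirB cx cy p)).map (pvDirB cx cy)) := by
          rw [hhead, List.map_cons, PySem.Set.ofList_cons, pv_discard_ofList, List.filter_map]
          simp [Function.comp_def]
        rw [hset, List.map_cons]
        simp only [List.cons_append, List.nil_append]
        congr 1
        apply List.map_congr_left
        intro k hk
        have hkne : k ≠ pvDirB cx cy p := by
          rw [PySem.Set.mem_ofList] at hk
          obtain ⟨q, hq, rfl⟩ := List.mem_map.mp hk
          have := List.of_mem_filter hq
          simpa using this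
        congr 1
        rw [List.filter_filter]
        apply List.filter_congr
        intro a _
        by_cases h : pvDirB cx cy a = k
        · simp [h, hkne]
        · simp [h]
      · intro q hq
        rw [PySem.Dict.contains_insert]
        have hqne : (pvDirB cx cy q == pvDirB cx cy p) = false := by
          have := List.of_mem_filter hq
          simpa using this
        rw [hqne]
        exact hdisj q (List.mem_of_mem_filter hq)

-- modify-append loop from the empty dict = dedup keys with their filtered buckets
theorem pv_a_fold_items {K A : Type} [BEq K] [LawfulBEq K] (l : List (K × A)) :
    ((l.foldl (fun d p => d.modify p.1 [] (· ++ [p.2]))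
        (PySem.Dict.empty : PySem.Dict K (List A)))).items
      = (PySem.Set.ofList (l.map Prod.fst)).map
          (fun k => (k, (l.filter (fun q => q.1 == k)).map Prod.snd)) := by
  have hnd : ((l.foldl (fun d p => d.modify p.1 [] (· ++ [p.2]))
      (PySem.Dict.empty : PySem.Dict K (List A)))).keys.Nodup := by
    apply PySem.Dict.nodup_keys_foldl_modify_key
    simp [PySem.Dict.keys_empty]
  rw [PySem.Dict.items_eq_map_keys _ hnd []]
  rw [PySem.Dict.keys_foldl_modify_key (key := Prod.fst) (f := fun d x => (· ++ [x.2]))]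
  simp [PySem.Dict.getD_foldl_modify_append, PySem.Dict.getD_empty,
        PySem.Dict.keys_empty, PySem.Set.update_nil_left]

-- the same filtered point list on both sides: gcd == 0 exactly at the centre point
theorem pv_pts_eq (cx cy : Int) (l : List (Int × Int)) :
    l.filter (fun xy => !((Int.gcd (xy.1 - cx) (xy.2 - cy) : Int) == 0))
      = l.filter (fun p => p != (cx, cy)) := by
  apply List.filter_congr
  intro p _
  by_cases h : p = (cx, cy)
  · subst h; simp
  · have : ¬(p.1 - cx = 0 ∧ p.2 - cy = 0) := by
      intro ⟨h1, h2⟩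
      exact h (Prod.ext (by omega) (by omega))
    have hb : (p != (cx, cy)) = true := by simpa using h
    have hg : ((Int.gcd (p.1 - cx) (p.2 - cy) : Int) == 0) = false := by
      simp [Int.gcd_eq_zero_iff, this]
    rw [hb, hg]
    rfl

-- ===== VERDICT (by name: the statement is the Claim_ definition above) =====
theorem count_blocked_spec : Claim_equal_count_blocked := by
  intro cx cy data _
  unfold Spec_count_blocked
  simp only [count_blocked, count_blocked_alt]
  congr 1
  -- A's fold: skip-if-zero then modify  =  filter then modify
  have hfun : (fun (d : PySem.Dict (Int × Int) (List (Int × Int))) (xy : Int × Int) =>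
      let diff := (xy.1 - cx, xy.2 - cy)
      let g : Int := (Int.gcd diff.1 diff.2 : Int)
      if g == 0 then d
      else d.modify (diff.1.tdiv g, diff.2.tdiv g) [] (· ++ [(xy.1, xy.2)]))
    = (fun d xy =>
      if (!((Int.gcd (xy.1 - cx) (xy.2 - cy) : Int) == 0)) then
        d.modify (pvKeyA cx cy xy) [] (· ++ [(xy.1, xy.2)]) else d) := by
    funext d xy
    by_cases h : ((Int.gcd (xy.1 - cx) (xy.2 - cy) : Int) == 0) = true
    · simp only [h, Bool.not_true, if_pos, Bool.false_eq_true]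
      simp
    · simp only [Bool.not_eq_true] at h
      simp [h, pvKeyA]
  rw [hfun, PySem.List.foldl_if_eq_foldl_filter]
  set s := PySem.List.sorted data (fun xy => |cx - xy.1| + |cy - xy.2|) false with hs
  rw [pv_pts_eq]
  set pts := s.filter (fun p => p != (cx, cy)) with hpts
  have hmap : pts.foldl (fun d xy => d.modify (pvKeyA cx cy xy) [] (· ++ [(xy.1, xy.2)]))
        (PySem.Dict.empty : PySem.Dict (Int × Int) (List (Int × Int)))
      = (pts.map (fun xy => (pvKeyA cx cy xy, (xy.1, xy.2)))).foldl
          (fun d p => d.modify p.1 [] (· ++ [p.2])) PySem.Dict.empty := by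
    rw [List.foldl_map]
  rw [hmap, pv_a_fold_items,
      pv_loop_items cx cy pts.length pts rfl PySem.Dict.empty
        (by simp [PySem.Dict.keys_empty]) (by simp [PySem.Dict.contains_empty])]
  simp only [PySem.Dict.empty, List.nil_append]
  rw [List.map_map, pv_key_eq]
  apply List.map_congr_left
  intro k _
  rw [List.filter_map]
  congr 1
  rw [List.map_map]
  have : ((fun q : (Int × Int) × (Int × Int) => q.1 == k) ∘ fun xy => (pvDirB cx cy xy, (xy.1, xy.2)))
      = fun q => pvDirB cx cy q == k := rfl
  rw [this]
  have : (Prod.snd ∘ fun xy : Int × Int => (pvDirB cx cy xy, (xy.1, xy.2))) = fun xy => xy := by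
    funext xy; rfl
  rw [this, List.map_id']
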